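-- pv_equiv track=rewrite | github.com/SourceSeeker-SameOrigin/BridgeAI | backend/app/plugins/industries/metaphysics/calculations.py | _place_tianfu_series
-- ===== SOURCE A (Python) =====
-- PALACE_DIZHI = ["寅", "卯", "辰", "巳", "午", "未", "申", "酉", "戌", "亥", "子", "丑"]
--
-- def _place_tianfu_series(ziwei_pos: int) -> dict[str, str]:
--     """根据紫微星位置排布天府系星。
--
--     天府位置 = 紫微的对宫关系。
--     天府系: 天府、太阴、贪狼、巨门、天相、天梁、七杀、破军
--     """
--     # 天府位置: 紫微位置的镜像 (以寅-申轴)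
--     tianfu_pos = (12 - ziwei_pos + 4) % 12
--     # 另一种算法: 查表
--     # 简化: 天府=4-紫微 (从辰宫起算)
--     tianfu_pos = _calc_tianfu_from_ziwei(ziwei_pos)
--
--     offsets = {
--         "天府": 0, "太阴": 1, "贪狼": 2, "巨门": 3,
--         "天相": 4, "天梁": 5, "七杀": 6, "破军": 10,
--     }
--     result = {}
--     for star, offset in offsets.items():
--         pos = (tianfu_pos + offset) % 12
--         result[star] = PALACE_DIZHI[pos]
--     return result
--
-- def _calc_tianfu_from_ziwei(ziwei_pos: int) -> int:
--     """天府与紫微的对应关系。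
--
--     紫微在子→天府在辰; 紫微在丑→天府在卯; 紫微在寅→天府在寅;
--     紫微在卯→天府在丑; 紫微在辰→天府在子; 紫微在巳→天府在亥;
--     紫微在午→天府在戌; 紫微在未→天府在酉; 紫微在申→天府在申;
--     紫微在酉→天府在未; 紫微在戌→天府在午; 紫微在亥→天府在巳;
--     """
--     # 紫微地支索引(PALACE_DIZHI从寅开始): 0=寅,1=卯,...,10=子,11=丑
--     # 转为标准地支索引: 寅=2,卯=3,...子=0,丑=1
--     zw_std = (ziwei_pos + 2) % 12  # 转为子=0的标准地支
--     # 天府标准 = (12 - zw_std + 4) % 12 = (16 - zw_std) % 12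
--     tf_std = (16 - zw_std) % 12
--     # 转回宫位索引
--     return (tf_std - 2) % 12
-- ===== SOURCE B (Python) =====
-- # Lookup-table re-implementation: 12 fully expanded result dicts, indexed by ziwei_pos % 12.
-- _TIANFU_TABLE = [
--     {'天府': '寅', '太阴': '卯', '贪狼': '辰', '巨门': '巳', '天相': '午', '天梁': '未', '七杀': '申', '破军': '子'},
--     {'天府': '丑', '太阴': '寅', '贪狼': '卯', '巨门': '辰', '天相': '巳', '天梁': '午', '七杀': '未', '破军': '亥'},
--     {'天府': '子', '太阴': '丑', '贪狼': '寅', '巨门': '卯', '天相': '辰', '天梁': '巳', '七杀': '午', '破军': '戌'},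
--     {'天府': '亥', '太阴': '子', '贪狼': '丑', '巨门': '寅', '天相': '卯', '天梁': '辰', '七杀': '巳', '破军': '酉'},
--     {'天府': '戌', '太阴': '亥', '贪狼': '子', '巨门': '丑', '天相': '寅', '天梁': '卯', '七杀': '辰', '破军': '申'},
--     {'天府': '酉', '太阴': '戌', '贪狼': '亥', '巨门': '子', '天相': '丑', '天梁': '寅', '七杀': '卯', '破军': '未'},
--     {'天府': '申', '太阴': '酉', '贪狼': '戌', '巨门': '亥', '天相': '子', '天梁': '丑', '七杀': '寅', '破军': '午'},
--     {'天府': '未', '太阴': '申', '贪狼': '酉', '巨门': '戌', '天相': '亥', '天梁': '子', '七杀': '丑', '破军': '巳'},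
--     {'天府': '午', '太阴': '未', '贪狼': '申', '巨门': '酉', '天相': '戌', '天梁': '亥', '七杀': '子', '破军': '辰'},
--     {'天府': '巳', '太阴': '午', '贪狼': '未', '巨门': '申', '天相': '酉', '天梁': '戌', '七杀': '亥', '破军': '卯'},
--     {'天府': '辰', '太阴': '巳', '贪狼': '午', '巨门': '未', '天相': '申', '天梁': '酉', '七杀': '戌', '破军': '寅'},
--     {'天府': '卯', '太阴': '辰', '贪狼': '巳', '巨门': '午', '天相': '未', '天梁': '申', '七杀': '酉', '破军': '丑'},
-- ]
--
-- def _place_tianfu_series(ziwei_pos: int) -> dict[str, str]: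
--     return dict(_TIANFU_TABLE[ziwei_pos % 12])
-- ===== Notes on version B (the rewrite author's own statement) =====
-- stated objective: simpler
-- what changed: Replaced the helper's modular arithmetic and the per-star placement loop by a precomputed module-level table of the 12 fully expanded result dicts; the function body is a single indexed lookup (with a copy).
import Mathlib
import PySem

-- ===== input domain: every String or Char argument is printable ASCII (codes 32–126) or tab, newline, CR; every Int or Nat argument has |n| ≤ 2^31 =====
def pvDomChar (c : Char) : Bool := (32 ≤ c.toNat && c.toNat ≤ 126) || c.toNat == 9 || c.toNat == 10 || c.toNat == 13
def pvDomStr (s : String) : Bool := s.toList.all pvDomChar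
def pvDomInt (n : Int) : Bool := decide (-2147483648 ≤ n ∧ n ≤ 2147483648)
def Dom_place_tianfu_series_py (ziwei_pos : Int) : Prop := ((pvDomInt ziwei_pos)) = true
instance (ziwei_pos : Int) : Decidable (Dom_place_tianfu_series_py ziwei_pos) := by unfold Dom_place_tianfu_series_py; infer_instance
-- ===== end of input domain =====

-- B replaces the per-call helper arithmetic and placement loop by a single lookup in a
-- precomputed 12-entry table of fully expanded results (objective: simpler).

-- ===== PORT A =====
def PALACE_DIZHI : List String :=
  ["寅", "卯", "辰", "巳", "午", "未", "申", "酉", "戌", "亥", "子", "丑"]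

def calc_tianfu_from_ziwei (ziwei_pos : Int) : Int :=
  let zw_std := PySem.Int.mod (ziwei_pos + 2) 12
  let tf_std := PySem.Int.mod (16 - zw_std) 12
  PySem.Int.mod (tf_std - 2) 12

def place_tianfu_series_py (ziwei_pos : Int) : List (String × String) :=
  let _tianfu_pos := PySem.Int.mod (12 - ziwei_pos + 4) 12   -- overwritten in A
  let tianfu_pos := calc_tianfu_from_ziwei ziwei_pos
  let offsets : List (String × Int) :=
    [("天府", 0), ("太阴", 1), ("贪狼", 2), ("巨门", 3),
     ("天相", 4), ("天梁", 5), ("七杀", 6), ("破军", 10)]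
  let result := offsets.foldl (fun (d : PySem.Dict String String) sp =>
    let pos := PySem.Int.mod (tianfu_pos + sp.2) 12
    d.insert sp.1 (PySem.List.pyGetD PALACE_DIZHI pos "")) PySem.Dict.empty
  result.items

-- ===== PORT B =====
def TIANFU_TABLE : List (List (String × String)) :=
  [[("天府", "寅"), ("太阴", "卯"), ("贪狼", "辰"), ("巨门", "巳"), ("天相", "午"), ("天梁", "未"), ("七杀", "申"), ("破军", "子")],
   [("天府", "丑"), ("太阴", "寅"), ("贪狼", "卯"), ("巨门", "辰"), ("天相", "巳"), ("天梁", "午"), ("七杀", "未"), ("破军", "亥")],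
   [("天府", "子"), ("太阴", "丑"), ("贪狼", "寅"), ("巨门", "卯"), ("天相", "辰"), ("天梁", "巳"), ("七杀", "午"), ("破军", "戌")],
   [("天府", "亥"), ("太阴", "子"), ("贪狼", "丑"), ("巨门", "寅"), ("天相", "卯"), ("天梁", "辰"), ("七杀", "巳"), ("破军", "酉")],
   [("天府", "戌"), ("太阴", "亥"), ("贪狼", "子"), ("巨门", "丑"), ("天相", "寅"), ("天梁", "卯"), ("七杀", "辰"), ("破军", "申")],
   [("天府", "酉"), ("太阴", "戌"), ("贪狼", "亥"), ("巨门", "子"), ("天相", "丑"), ("天梁", "寅"), ("七杀", "卯"), ("破军", "未")],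
   [("天府", "申"), ("太阴", "酉"), ("贪狼", "戌"), ("巨门", "亥"), ("天相", "子"), ("天梁", "丑"), ("七杀", "寅"), ("破军", "午")],
   [("天府", "未"), ("太阴", "申"), ("贪狼", "酉"), ("巨门", "戌"), ("天相", "亥"), ("天梁", "子"), ("七杀", "丑"), ("破军", "巳")],
   [("天府", "午"), ("太阴", "未"), ("贪狼", "申"), ("巨门", "酉"), ("天相", "戌"), ("天梁", "亥"), ("七杀", "子"), ("破军", "辰")],
   [("天府", "巳"), ("太阴", "午"), ("贪狼", "未"), ("巨门", "申"), ("天相", "酉"), ("天梁", "戌"), ("七杀", "亥"), ("破军", "卯")],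
   [("天府", "辰"), ("太阴", "巳"), ("贪狼", "午"), ("巨门", "未"), ("天相", "申"), ("天梁", "酉"), ("七杀", "戌"), ("破军", "寅")],
   [("天府", "卯"), ("太阴", "辰"), ("贪狼", "巳"), ("巨门", "午"), ("天相", "未"), ("天梁", "申"), ("七杀", "酉"), ("破军", "丑")]]

def place_tianfu_series_py_alt (ziwei_pos : Int) : List (String × String) :=
  PySem.List.pyGetD TIANFU_TABLE (PySem.Int.mod ziwei_pos 12) []

-- ===== PRECONDITION & SPEC =====
def Spec_place_tianfu_series_py (ziwei_pos : Int) (out : List (String × String)) : Prop := out = place_tianfu_series_py_alt ziwei_pos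
instance (ziwei_pos : Int) (out : List (String × String)) : Decidable (Spec_place_tianfu_series_py ziwei_pos out) := by unfold Spec_place_tianfu_series_py; infer_instance

-- ===== CLAIM (what is proved, stated in full; the proofs are below) =====
def Claim_equal_place_tianfu_series_py : Prop := ∀ (ziwei_pos : Int), Dom_place_tianfu_series_py ziwei_pos → Spec_place_tianfu_series_py ziwei_pos (place_tianfu_series_py ziwei_pos)

-- ===== LEMMAS AND PROOFS =====

-- both sides depend on ziwei_pos only through its residue mod 12
theorem placeA_mod (z : Int) :
    place_tianfu_series_py z = place_tianfu_series_py (PySem.Int.mod z 12) := by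
  have h : calc_tianfu_from_ziwei z = calc_tianfu_from_ziwei (PySem.Int.mod z 12) := by
    unfold calc_tianfu_from_ziwei
    have h12 : (0 : Int) < 12 := by norm_num
    simp only [PySem.Int.mod_eq_emod_of_pos h12]
    omega
  unfold place_tianfu_series_py
  rw [h]

theorem placeB_mod (z : Int) :
    place_tianfu_series_py_alt z = place_tianfu_series_py_alt (PySem.Int.mod z 12) := by
  unfold place_tianfu_series_py_alt
  have h12 : (0 : Int) < 12 := by norm_num
  simp only [PySem.Int.mod_eq_emod_of_pos h12, Int.emod_emod_of_dvd _ (dvd_refl 12)]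

-- ===== VERDICT (by name: the statement is the Claim_ definition above) =====
theorem place_tianfu_series_py_spec : Claim_equal_place_tianfu_series_py := by
  intro z _
  unfold Spec_place_tianfu_series_py
  rw [placeA_mod, placeB_mod]
  have h12 : (0 : Int) < 12 := by norm_num
  have h0 := PySem.Int.mod_nonneg z h12
  have h1 := PySem.Int.mod_lt z h12
  set r := PySem.Int.mod z 12 with hr
  clear_value r
  interval_cases r <;> decide
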